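-- pv_equiv track=rewrite | github.com/KimDohaAcc/problem-solving | 백준/Gold/2661. 좋은수열/좋은수열.py | find
-- ===== SOURCE A (Python) =====
-- def is_good(seq):
--     length = len(seq)
--     for i in range(1, length // 2 + 1):  # 정수 나눗셈
--         if seq[-i:] == seq[-2 * i:-i]:
--             return False
--     return True
--
-- def find(n):
--     if n == 1:
--         return '1'
--
--     def backtrack(seq):
--         if len(seq) == n:
--             return seq
--
--         for i in '123':
--             new_seq = seq + i
--             if is_good(new_seq):
--                 result = backtrack(new_seq)
--                 if result:
--                     return result
--
--         return None
--
--     return backtrack('')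
-- ===== SOURCE B (Python) =====
-- def is_good(seq):
--     length = len(seq)
--     for i in range(1, length // 2 + 1):
--         if seq[-i:] == seq[-2 * i:-i]:
--             return False
--     return True
--
-- def find(n):
--     if n == 1:
--         return '1'
--     stack = ['']
--     while stack:
--         seq = stack.pop()
--         if len(seq) == n:
--             return seq
--         for c in '321':
--             new_seq = seq + c
--             if is_good(new_seq):
--                 stack.append(new_seq)
--     return None
-- ===== Notes on version B (the rewrite author's own statement) =====
-- stated objective: alternative
-- what changed: Replaces the recursive backtracking closure by an iterative depth-first search over an explicit stack of partial sequences (pushing extensions '3','2','1' so '1' is tried first), keeping is_good's pruning identical; being iterative it also avoids CPython's recursion limit.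
import Mathlib
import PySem

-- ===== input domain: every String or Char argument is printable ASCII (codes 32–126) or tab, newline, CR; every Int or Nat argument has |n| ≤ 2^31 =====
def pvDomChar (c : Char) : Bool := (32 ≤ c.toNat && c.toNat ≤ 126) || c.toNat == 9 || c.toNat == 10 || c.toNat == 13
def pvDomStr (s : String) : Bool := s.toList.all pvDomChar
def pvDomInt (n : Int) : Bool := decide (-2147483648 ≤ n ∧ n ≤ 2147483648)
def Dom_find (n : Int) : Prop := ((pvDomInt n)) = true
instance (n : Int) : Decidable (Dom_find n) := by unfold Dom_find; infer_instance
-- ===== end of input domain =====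

-- B replaces A's recursive backtracking by an iterative depth-first search over an
-- explicit stack of partial sequences (objective: alternative decomposition, same pruning).


-- ===== PORT A =====
-- is_good(seq): the early-return for loop is ported as List.all over the same range
def isGood (s : List Char) : Bool :=
  (PySem.List.pyRange 1 (PySem.Int.floordiv (s.length : Int) 2 + 1) 1).all
    (fun i => !(PySem.List.slice s (some (-i)) none == PySem.List.slice s (some (-2*i)) (some (-i))))

-- the 'for i in "123"' loop of backtrack; rc is the recursive call backtrack;
-- 'if result: return result' keeps the truthiness test (empty string is falsy)
def tryChars (rc : List Char → Option (List Char)) (seq : List Char) :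
    List Char → Option (List Char)
  | [] => none
  | c :: cs =>
      let new := seq ++ [c]
      if isGood new then
        match rc new with
        | some r => if r = [] then tryChars rc seq cs else some r
        | none => tryChars rc seq cs
      else tryChars rc seq cs

-- backtrack(seq); fuel only makes the recursion structural: n.toNat - seq.length
-- bounds the remaining depth, so it never cuts the search off on the admitted inputs
def btA (n : Int) : Nat → List Char → Option (List Char)
  | fuel, seq =>
      if (seq.length : Int) = n then some seq
      else
        match fuel with
        | 0 => none
        | Nat.succ f => tryChars (btA n f) seq ['1', '2', '3']

def find (n : Int) : Option String :=
  if n = 1 then some "1"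
  else (btA n n.toNat []).map (fun l => String.ofList l)

-- ===== PORT B =====
-- the while loop over the stack (head of the list = top of the stack); fuel 3^(n+1)
-- bounds the number of iterations and is proved sufficient below
def loopB (n : Int) : Nat → List (List Char) → Option (List Char)
  | _, [] => none
  | 0, _ :: _ => none
  | Nat.succ f, seq :: rest =>
      if (seq.length : Int) = n then some seq
      else
        loopB n f (['3', '2', '1'].foldl
          (fun st c => let new := seq ++ [c]; if isGood new then new :: st else st) rest)

def find_alt (n : Int) : Option String :=
  if n = 1 then some "1"
  else (loopB n (3 ^ (n.toNat + 1)) [[]]).map (fun l => String.ofList l)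

-- ===== PRECONDITION & SPEC =====
-- Pre_ excludes n < 0 (backtrack recurses forever down an infinite branch until
-- CPython raises RecursionError) and n > 900: A recurses to depth n, so it raises
-- RecursionError near CPython's default recursion limit (around n = 1000, the exact
-- threshold depending on interpreter stack state); 900 is a safe margin below it.
def Pre_find (n : Int) : Prop := 0 ≤ n ∧ n ≤ 900
instance (n : Int) : Decidable (Pre_find n) := by unfold Pre_find; infer_instance
def pvWitness_find : Int := 5

def Spec_find (n : Int) (out : Option String) : Prop := out = find_alt n
instance (n : Int) (out : Option String) : Decidable (Spec_find n out) := by unfold Spec_find; infer_instance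

-- ===== CLAIM (what is proved, stated in full; the proofs are below) =====
def Claim_equal_find : Prop := ∀ (n : Int), Dom_find n → Pre_find n → Spec_find n (find n)

-- ===== LEMMAS AND PROOFS =====

-- geom k = number of nodes of a ternary tree of height k; fuel budget for the DFS
def geom : Nat → Nat
  | 0 => 1
  | k + 1 => 3 * geom k + 1

-- the chain of A-side backtrack results over the stack, first success wins
def chainA (n : Int) : List (List Char) → Option (List Char)
  | [] => none
  | s :: rest =>
      match btA n (n.toNat - s.length) s with
      | some r => some r
      | none => chainA n rest

lemma geom_pos (k : Nat) : 1 ≤ geom k := by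
  cases k <;> simp [geom]

lemma two_geom (k : Nat) : 2 * geom k + 1 = 3 ^ (k + 1) := by
  induction k with
  | zero => simp [geom]
  | succ k ih => simp [geom, pow_succ]; omega

lemma tryChars_some {P : List Char → Prop} (rc : List Char → Option (List Char))
    (h : ∀ x r, rc x = some r → P r) :
    ∀ (seq cs : List Char) r, tryChars rc seq cs = some r → P r := by
  intro seq cs
  induction cs with
  | nil => intro r hr; simp [tryChars] at hr
  | cons c cs ih =>
    intro r hr
    simp only [tryChars] at hr
    split at hr
    · cases hrec : rc (seq ++ [c]) with
      | none => rw [hrec] at hr; exact ih r hr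
      | some r' =>
        rw [hrec] at hr
        by_cases hre : r' = []
        · simp [hre] at hr; exact ih r hr
        · simp [hre] at hr; exact hr ▸ h _ _ hrec
    · exact ih r hr

lemma btA_length (n : Int) : ∀ (f : Nat) (seq r : List Char),
    btA n f seq = some r → (r.length : Int) = n := by
  intro f
  induction f with
  | zero =>
    intro seq r h
    simp only [btA] at h
    split at h
    · cases h; assumption
    · simp at h
  | succ f ih =>
    intro seq r h
    simp only [btA] at h
    split at h
    · cases h; assumption
    · exact tryChars_some (btA n f) (fun x r hx => ih x r hx) seq _ r h

lemma chainA_append (n : Int) : ∀ (xs ys : List (List Char)),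
    chainA n (xs ++ ys) = match chainA n xs with
      | some r => some r
      | none => chainA n ys := by
  intro xs ys
  induction xs with
  | nil => simp [chainA]
  | cons s xs ih =>
    simp only [List.cons_append, chainA]
    cases btA n (n.toNat - s.length) s with
    | some r => simp
    | none => simpa using ih

-- the three pushes of the '321' loop, read back as a filtered list in order 1,2,3
lemma push_foldl (seq : List Char) (rest : List (List Char)) :
    ['3', '2', '1'].foldl
      (fun st c => let new := seq ++ [c]; if isGood new then new :: st else st) rest
    = ((['1', '2', '3'].filter (fun c => isGood (seq ++ [c]))).map
        (fun c => seq ++ [c])) ++ rest := by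
  by_cases h1 : isGood (seq ++ ['1']) <;>
    by_cases h2 : isGood (seq ++ ['2']) <;>
      by_cases h3 : isGood (seq ++ ['3']) <;>
        simp [List.foldl, List.filter, h1, h2, h3]

lemma tryChars_eq_chain (n : Int) (seq : List Char) (hlt : (seq.length : Int) < n) :
    ∀ cs : List Char,
      tryChars (btA n (n.toNat - seq.length - 1)) seq cs
      = chainA n ((cs.filter (fun c => isGood (seq ++ [c]))).map (fun c => seq ++ [c])) := by
  intro cs
  induction cs with
  | nil => simp [tryChars, chainA]
  | cons c cs ih =>
    by_cases hg : isGood (seq ++ [c])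
    · have hfuel : n.toNat - (seq ++ [c]).length = n.toNat - seq.length - 1 := by
        simp [List.length_append]
        omega
      simp only [tryChars, List.filter, hg, List.map, chainA, hfuel]
      cases hb : btA n (n.toNat - seq.length - 1) (seq ++ [c]) with
      | none => simpa using ih
      | some r =>
        have hr : (r.length : Int) = n := btA_length n _ _ _ hb
        have hne : r ≠ [] := by
          intro h0; rw [h0] at hr; simp at hr; omega
        simp [hne]
    · simp only [tryChars, List.filter, hg]
      simpa using ih

lemma sum_children (n : Int) (s : List Char) :
    ((List.filter (fun c => isGood (s ++ [c])) ['1', '2', '3']).map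
      ((fun t => geom (n.toNat - t.length)) ∘ fun c => s ++ [c])).sum
    ≤ 3 * geom (n.toNat - (s.length + 1)) := by
  by_cases h1 : isGood (s ++ ['1']) <;>
    by_cases h2 : isGood (s ++ ['2']) <;>
      by_cases h3 : isGood (s ++ ['3']) <;>
        simp [List.filter, h1, h2, h3, List.length_append] <;> omega

lemma loopB_eq_chainA (n : Int) (hn : 1 ≤ n) :
    ∀ (f : Nat) (stack : List (List Char)),
      (∀ s ∈ stack, (s.length : Int) ≤ n) →
      (stack.map (fun s => geom (n.toNat - s.length))).sum ≤ f →
      loopB n f stack = chainA n stack := by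
  intro f
  induction f with
  | zero =>
    intro stack hinv hsum
    cases stack with
    | nil => simp [loopB, chainA]
    | cons s rest =>
      exfalso
      have := geom_pos (n.toNat - s.length)
      simp [List.map_cons, List.sum_cons] at hsum
      omega
  | succ f ih =>
    intro stack hinv hsum
    cases stack with
    | nil => simp [loopB, chainA]
    | cons s rest =>
      by_cases hs : (s.length : Int) = n
      · have hf : n.toNat - s.length = 0 := by omega
        simp [loopB, chainA, hs, hf, btA]
      · have hle : (s.length : Int) ≤ n := hinv s (by simp)
        have hlt : (s.length : Int) < n := lt_of_le_of_ne hle hs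
        have hk : 1 ≤ n.toNat - s.length := by omega
        rw [loopB, if_neg hs, push_foldl]
        have hch := sum_children n s
        have hgeq : geom (n.toNat - s.length)
            = 3 * geom (n.toNat - (s.length + 1)) + 1 := by
          have h' : n.toNat - s.length = (n.toNat - (s.length + 1)) + 1 := by omega
          rw [h']; rfl
        have hsum' : ((((['1','2','3'].filter (fun c => isGood (s ++ [c]))).map
              (fun c => s ++ [c])) ++ rest).map
              (fun t => geom (n.toNat - t.length))).sum ≤ f := by
          rw [List.map_append, List.sum_append, List.map_map]
          rw [List.map_cons, List.sum_cons] at hsum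
          omega
        have hinv' : ∀ t ∈ (((['1','2','3'].filter (fun c => isGood (s ++ [c]))).map
              (fun c => s ++ [c])) ++ rest), (t.length : Int) ≤ n := by
          intro t ht
          rcases List.mem_append.mp ht with h | h
          · rcases List.mem_map.mp h with ⟨c, _, rfl⟩
            simp [List.length_append]; omega
          · exact hinv t (by simp [h])
        rw [ih _ hinv' hsum']
        rw [chainA_append]
        conv_rhs => rw [chainA]
        have hbt : btA n (n.toNat - s.length) s
            = tryChars (btA n (n.toNat - s.length - 1)) s ['1','2','3'] := by
          have h' : n.toNat - s.length = (n.toNat - s.length - 1) + 1 := by omega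
          rw [h', btA, if_neg hs]
          simp
        rw [hbt, tryChars_eq_chain n s hlt]

-- ===== VERDICT (by name: the statement is the Claim_ definition above) =====
theorem find_spec : Claim_equal_find := by
  intro n _ hpre
  unfold Spec_find find find_alt
  rcases hpre with ⟨h0, _⟩
  by_cases h1 : n = 1
  · simp [h1]
  · simp only [h1, if_neg, not_false_iff]
    by_cases hz : n = 0
    · subst hz; decide
    · have hn : 1 ≤ n := by omega
      have hsum : ([([] : List Char)].map (fun s => geom (n.toNat - s.length))).sum
          ≤ 3 ^ (n.toNat + 1) := by
        have := two_geom n.toNat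
        simp [List.map_cons, List.sum_cons]
        omega
      rw [loopB_eq_chainA n hn _ [[]] (by intro s hs; simp at hs; simp [hs]; omega) hsum]
      simp only [chainA, List.length_nil, Nat.sub_zero]
      cases hb : btA n n.toNat [] with
      | some r => simp
      | none => simp
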